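-- pv_equiv track=rewrite | github.com/jeraldlabalan/Expressora-Sign-Language-Module | unified/eval/eval_origin.py | check_mono_origin_labels
-- ===== SOURCE A (Python) =====
-- from collections import defaultdict
--
-- def check_mono_origin_labels(y_test, origin_test, gloss_labels):
--     """Check for labels that only appear in one origin (shortcut learning risk)"""
--     label_origins = defaultdict(set)
--
--     for gloss_idx, origin_idx in zip(y_test, origin_test):
--         label_origins[int(gloss_idx)].add(int(origin_idx))
--
--     mono_origin_labels = []
--     for gloss_idx, origins in label_origins.items():
--         if len(origins) == 1:
--             mono_origin_labels.append((gloss_labels[gloss_idx], list(origins)[0]))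
--
--     return mono_origin_labels
-- ===== SOURCE B (Python) =====
-- def check_mono_origin_labels(y_test, origin_test, gloss_labels):
--     """Check for labels that only appear in one origin (shortcut learning risk)"""
--     pairs = [(int(g), int(o)) for g, o in zip(y_test, origin_test)]
--     result = []
--     seen = set()
--     for g, o in pairs:
--         if g in seen:
--             continue
--         seen.add(g)
--         if all(q == o for p, q in pairs if p == g):
--             result.append((gloss_labels[g], o))
--     return result
-- ===== Notes on version B (the rewrite author's own statement) =====
-- stated objective: alternative
-- what changed: A builds a dict of per-label origin sets in one pass and then filters sets of size 1; B keeps no per-label mapping at all: it walks the pair list, and at each label's first occurrence re-scans the pair list to test whether every origin of that label equals the first one, emitting directly.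
import Mathlib
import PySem

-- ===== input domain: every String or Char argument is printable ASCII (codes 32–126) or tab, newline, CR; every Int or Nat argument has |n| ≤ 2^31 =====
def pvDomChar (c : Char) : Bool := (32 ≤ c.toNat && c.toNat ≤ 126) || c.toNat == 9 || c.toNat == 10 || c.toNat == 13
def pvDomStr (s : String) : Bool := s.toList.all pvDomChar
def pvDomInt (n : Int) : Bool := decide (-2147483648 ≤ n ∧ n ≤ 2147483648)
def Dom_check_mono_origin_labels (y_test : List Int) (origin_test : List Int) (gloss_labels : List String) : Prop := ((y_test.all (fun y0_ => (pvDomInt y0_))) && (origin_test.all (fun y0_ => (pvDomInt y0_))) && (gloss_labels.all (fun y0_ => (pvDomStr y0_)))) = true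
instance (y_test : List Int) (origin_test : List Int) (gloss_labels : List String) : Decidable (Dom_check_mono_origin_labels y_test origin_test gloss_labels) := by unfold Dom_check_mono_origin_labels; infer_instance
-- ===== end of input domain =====

-- B drops A's per-label dict of origin sets entirely: it emits at each label's first occurrence after re-scanning the pair list to check all its origins coincide — an alternative (nested-scan) algorithm, not faster.


-- ===== PORT A =====
def check_mono_origin_labels (y_test : List Int) (origin_test : List Int) (gloss_labels : List String) : List (String × Int) :=
  let label_origins : PySem.Dict Int (PySem.Set Int) :=
    (y_test.zip origin_test).foldl
      (fun d p => d.modify p.1 PySem.Set.empty (fun s => PySem.Set.add s p.2))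
      PySem.Dict.empty
  label_origins.items.foldl
    (fun acc q =>
      if PySem.Set.len q.2 == 1 then
        acc ++ [((PySem.List.pyGet? gloss_labels q.1).getD "", (PySem.List.pyGet? q.2 0).getD 0)]
      else acc) []

-- ===== PORT B =====
def check_mono_origin_labels_alt (y_test : List Int) (origin_test : List Int) (gloss_labels : List String) : List (String × Int) :=
  let pairs := y_test.zip origin_test
  (pairs.foldl
    (fun st p =>
      if PySem.Set.contains st.2 p.1 then st
      else
        (if ((pairs.filter (fun q => q.1 == p.1)).map (fun q => q.2)).all (fun q => q == p.2)
          then st.1 ++ [((PySem.List.pyGet? gloss_labels p.1).getD "", p.2)]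
          else st.1,
         PySem.Set.add st.2 p.1))
    ([], PySem.Set.empty)).1

-- ===== PRECONDITION & SPEC =====
-- Pre_ excludes exactly the inputs where Python A raises IndexError: a label whose
-- distinct paired origins number exactly 1 but which is not a valid (possibly negative)
-- Python index into gloss_labels.
def Pre_check_mono_origin_labels (y_test : List Int) (origin_test : List Int) (gloss_labels : List String) : Prop :=
  ∀ g ∈ y_test,
    (PySem.List.dedup (((y_test.zip origin_test).filter (fun p => p.1 == g)).map (·.2))).length = 1 →
    (-(gloss_labels.length : Int) ≤ g ∧ g < gloss_labels.length)
instance (y_test : List Int) (origin_test : List Int) (gloss_labels : List String) : Decidable (Pre_check_mono_origin_labels y_test origin_test gloss_labels) := by unfold Pre_check_mono_origin_labels; infer_instance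

def pvWitness_check_mono_origin_labels : List Int × List Int × List String := ([0, 1, 1], [5, 2, 3], ["a", "b"])

def Spec_check_mono_origin_labels (y_test : List Int) (origin_test : List Int) (gloss_labels : List String) (out : List (String × Int)) : Prop := out = check_mono_origin_labels_alt y_test origin_test gloss_labels
instance (y_test : List Int) (origin_test : List Int) (gloss_labels : List String) (out : List (String × Int)) : Decidable (Spec_check_mono_origin_labels y_test origin_test gloss_labels out) := by unfold Spec_check_mono_origin_labels; infer_instance

-- ===== CLAIM (what is proved, stated in full; the proofs are below) =====
def Claim_equal_check_mono_origin_labels : Prop := ∀ (y_test : List Int) (origin_test : List Int) (gloss_labels : List String), Dom_check_mono_origin_labels y_test origin_test gloss_labels → Pre_check_mono_origin_labels y_test origin_test gloss_labels → Spec_check_mono_origin_labels y_test origin_test gloss_labels (check_mono_origin_labels y_test origin_test gloss_labels)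

-- ===== LEMMAS AND PROOFS =====

-- the origins paired with label g, in occurrence order
def pvOrigins (pairs : List (Int × Int)) (g : Int) : List Int :=
  (pairs.filter (fun q => q.1 == g)).map (fun q => q.2)

-- the (possibly empty) emission for label g, shared normal form of both outputs
def pvG (pairs : List (Int × Int)) (gl : List String) (g : Int) : List (String × Int) :=
  if (pvOrigins pairs g).all (fun x => x == (pvOrigins pairs g).headD 0)
  then [((PySem.List.pyGet? gl g).getD "", (pvOrigins pairs g).headD 0)]
  else []

lemma pv_getD_fold (l : List (Int × Int)) : ∀ (d : PySem.Dict Int (PySem.Set Int)) (c : Int),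
    (l.foldl (fun d p => d.modify p.1 PySem.Set.empty (fun s => PySem.Set.add s p.2)) d).getD c PySem.Set.empty
      = PySem.Set.update (d.getD c PySem.Set.empty) (pvOrigins l c) := by
  induction l with
  | nil => intro d c; simp [pvOrigins, PySem.Set.update]
  | cons p t ih =>
    intro d c
    simp only [List.foldl_cons, ih]
    rw [PySem.Dict.getD_modify]
    by_cases h : c = p.1
    · subst h
      simp [pvOrigins, PySem.Set.update_cons]
    · have h' : (p.1 == c) = false := by simpa using fun e => h e.symm
      simp [pvOrigins, h, h']

lemma pv_itemsA (pairs : List (Int × Int)) :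
    (pairs.foldl (fun d p => d.modify p.1 PySem.Set.empty (fun s => PySem.Set.add s p.2)) PySem.Dict.empty).items
      = (PySem.List.dedup (pairs.map Prod.fst)).map (fun g => (g, PySem.Set.ofList (pvOrigins pairs g))) := by
  have hfold : pairs.foldl (fun d p => d.modify p.1 PySem.Set.empty (fun s => PySem.Set.add s p.2)) PySem.Dict.empty
      = pairs.foldl (fun d p => d.modify (Prod.fst p) PySem.Set.empty ((fun _ p => fun s => PySem.Set.add s p.2) d p)) PySem.Dict.empty := rfl
  have hkeys : (pairs.foldl (fun d p => d.modify p.1 PySem.Set.empty (fun s => PySem.Set.add s p.2)) PySem.Dict.empty).keys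
      = PySem.Set.ofList (pairs.map Prod.fst) := by
    rw [hfold, PySem.Dict.keys_foldl_modify_key]
    simp [PySem.Set.update_nil_left]
  have hnd : (pairs.foldl (fun d p => d.modify p.1 PySem.Set.empty (fun s => PySem.Set.add s p.2)) PySem.Dict.empty).keys.Nodup := by
    rw [hfold]
    exact PySem.Dict.nodup_keys_foldl_modify_key _ _ _ _ _ (by simp)
  rw [PySem.Dict.items_eq_map_keys _ hnd PySem.Set.empty, hkeys]
  simp only [PySem.List.dedup_eq_ofList]
  refine List.map_congr_left (fun g _ => ?_)
  rw [pv_getD_fold]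
  simp [PySem.Set.update_nil_left]

lemma pv_origins_ne_nil {pairs : List (Int × Int)} {g : Int} (h : g ∈ pairs.map Prod.fst) :
    pvOrigins pairs g ≠ [] := by
  obtain ⟨q, hq, rfl⟩ := List.mem_map.1 h
  have : q ∈ pairs.filter (fun q' => q'.1 == q.1) := List.mem_filter.2 ⟨hq, by simp⟩
  simp only [pvOrigins, ne_eq, List.map_eq_nil_iff]
  intro he
  rw [he] at this
  cases this

-- set(l) is a singleton iff every element of l equals its head; then set(l) = [head]
lemma pv_ofList_all (l : List Int) (hl : l ≠ []) (h : l.all (fun x => x == l.headD 0) = true) :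
    PySem.Set.ofList l = [l.headD 0] := by
  obtain ⟨a, t, rfl⟩ := List.exists_cons_of_ne_nil hl
  simp only [List.headD_cons] at h ⊢
  rw [PySem.Set.ofList_cons]
  have hd : (PySem.Set.ofList t).discard a = [] := by
    rw [List.eq_nil_iff_forall_not_mem]
    intro x hx
    obtain ⟨hx1, hx2⟩ := (PySem.Set.mem_discard _ _ _).1 hx
    have := (List.all_eq_true.1 h) x (List.mem_cons_of_mem _ ((PySem.Set.mem_ofList _ _).1 hx1))
    exact hx2 (by simpa using this)
  rw [hd]

lemma pv_ofList_not_all (l : List Int) (hl : l ≠ []) (h : l.all (fun x => x == l.headD 0) ≠ true) :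
    (PySem.Set.ofList l).length ≠ 1 := by
  obtain ⟨a, t, rfl⟩ := List.exists_cons_of_ne_nil hl
  rw [PySem.Set.ofList_cons]
  intro hlen
  have hd : (PySem.Set.ofList t).discard a = [] := by
    refine List.length_eq_zero_iff.1 ?_
    simp only [List.length_cons] at hlen
    omega
  apply h
  simp only [List.headD_cons, List.all_cons, beq_self_eq_true, Bool.true_and, List.all_eq_true,
    beq_iff_eq]
  intro x hx
  by_cases hxa : x = a
  · exact hxa
  · have hmem : x ∈ (PySem.Set.ofList t).discard a :=
      (PySem.Set.mem_discard _ _ _).2 ⟨(PySem.Set.mem_ofList _ _).2 hx, hxa⟩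
    rw [hd] at hmem
    cases hmem

-- A's output is the flatMap normal form
lemma pv_outA (pairs : List (Int × Int)) (gl : List String) :
    ((pairs.foldl (fun d p => d.modify p.1 PySem.Set.empty (fun s => PySem.Set.add s p.2)) PySem.Dict.empty).items.foldl
      (fun acc q =>
        if PySem.Set.len q.2 == 1 then
          acc ++ [((PySem.List.pyGet? gl q.1).getD "", (PySem.List.pyGet? q.2 0).getD 0)]
        else acc) [])
    = (PySem.List.dedup (pairs.map Prod.fst)).flatMap (pvG pairs gl) := by
  rw [pv_itemsA, List.foldl_map]
  rw [PySem.List.foldl_congr_mem _ _ (fun acc g => acc ++ pvG pairs gl g) _ ?_]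
  · exact PySem.List.foldl_append_eq_flatMap _ _ []
  · intro acc g hg
    have hgk : g ∈ pairs.map Prod.fst := (PySem.List.mem_dedup _ _).1 hg
    have hne := pv_origins_ne_nil hgk
    unfold pvG
    dsimp only
    by_cases hall : (pvOrigins pairs g).all (fun x => x == (pvOrigins pairs g).headD 0) = true
    · have h1 := pv_ofList_all _ hne hall
      rw [if_pos hall, h1]
      have hlen : (PySem.Set.len [(pvOrigins pairs g).headD 0] == 1) = true := by
        simp [PySem.Set.len]
      rw [if_pos hlen]
      simp [PySem.List.pyGet?, PySem.List.pyIdx?]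
    · have h1 := pv_ofList_not_all _ hne hall
      rw [if_neg hall]
      have hlen : (PySem.Set.len (PySem.Set.ofList (pvOrigins pairs g)) == 1) = false := by
        simp only [PySem.Set.len, beq_eq_false_iff_ne, ne_eq]
        intro hcontra
        apply h1
        omega
      rw [if_neg (by rw [hlen]; exact Bool.false_ne_true), List.append_nil]

-- B's loop invariant: after any processed prefix, the accumulator is the flatMap
-- normal form over the distinct labels of that prefix, in first-seen order.
lemma pv_foldB (pairs : List (Int × Int)) (gl : List String) :
    ∀ (l₂ l₁ : List (Int × Int)), pairs = l₁ ++ l₂ →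
    (l₂.foldl (fun st p =>
        if PySem.Set.contains st.2 p.1 then st
        else
          (if ((pairs.filter (fun q => q.1 == p.1)).map (fun q => q.2)).all (fun q => q == p.2)
            then st.1 ++ [((PySem.List.pyGet? gl p.1).getD "", p.2)]
            else st.1,
           PySem.Set.add st.2 p.1))
      ((PySem.List.dedup (l₁.map Prod.fst)).flatMap (pvG pairs gl), PySem.Set.ofList (l₁.map Prod.fst)))
    = ((PySem.List.dedup (pairs.map Prod.fst)).flatMap (pvG pairs gl), PySem.Set.ofList (pairs.map Prod.fst)) := by
  intro l₂
  induction l₂ with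
  | nil =>
    intro l₁ hp
    simp [hp]
  | cons p t ih =>
    intro l₁ hp
    have hp' : pairs = (l₁ ++ [p]) ++ t := by rw [hp, List.append_assoc, List.singleton_append]
    rw [List.foldl_cons]
    by_cases hm : p.1 ∈ l₁.map Prod.fst
    · have hc : PySem.Set.contains (PySem.Set.ofList (l₁.map Prod.fst)) p.1 = true :=
        (PySem.Set.contains_iff _ _).2 ((PySem.Set.mem_ofList _ _).2 hm)
      rw [if_pos hc]
      have hkeys : PySem.Set.ofList ((l₁ ++ [p]).map Prod.fst) = PySem.Set.ofList (l₁.map Prod.fst) := by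
        rw [List.map_append, List.map_singleton, PySem.Set.ofList_append_singleton,
          PySem.Set.add_of_mem ((PySem.Set.mem_ofList _ _).2 hm)]
      have hded : PySem.List.dedup ((l₁ ++ [p]).map Prod.fst) = PySem.List.dedup (l₁.map Prod.fst) := by
        simp only [PySem.List.dedup_eq_ofList]
        exact hkeys
      have := ih (l₁ ++ [p]) hp'
      rw [hded, hkeys] at this
      exact this
    · have hc : PySem.Set.contains (PySem.Set.ofList (l₁.map Prod.fst)) p.1 = false := by
        rw [← Bool.not_eq_true, PySem.Set.contains_iff, PySem.Set.mem_ofList]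
        exact hm
      rw [if_neg (by rw [hc]; exact Bool.false_ne_true)]
      have hl₁ : l₁.filter (fun q => q.1 == p.1) = [] := by
        rw [List.filter_eq_nil_iff]
        intro q hq
        simp only [beq_iff_eq]
        intro he
        exact hm (he ▸ List.mem_map_of_mem hq)
      have hfil : pairs.filter (fun q => q.1 == p.1) = p :: t.filter (fun q => q.1 == p.1) := by
        rw [hp, List.filter_append, hl₁, List.nil_append, List.filter_cons_of_pos (by simp)]
      have hhead : ((pairs.filter (fun q => q.1 == p.1)).map (fun q => q.2)).headD 0 = p.2 := by
        rw [hfil]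
        rfl
      have hkeys : PySem.List.dedup ((l₁ ++ [p]).map Prod.fst)
          = PySem.List.dedup (l₁.map Prod.fst) ++ [p.1] := by
        simp only [PySem.List.dedup_eq_ofList, List.map_append, List.map_singleton,
          PySem.Set.ofList_append_singleton]
        exact PySem.Set.add_of_not_mem (by rw [PySem.Set.mem_ofList]; exact hm)
      have hstep :
          (if ((pairs.filter (fun q => q.1 == p.1)).map (fun q => q.2)).all (fun q => q == p.2)
            then (PySem.List.dedup (l₁.map Prod.fst)).flatMap (pvG pairs gl) ++ [((PySem.List.pyGet? gl p.1).getD "", p.2)]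
            else (PySem.List.dedup (l₁.map Prod.fst)).flatMap (pvG pairs gl))
          = (PySem.List.dedup ((l₁ ++ [p]).map Prod.fst)).flatMap (pvG pairs gl) := by
        rw [hkeys, List.flatMap_append, List.flatMap_singleton]
        unfold pvG pvOrigins
        rw [hhead]
        by_cases hcond : ((pairs.filter (fun q => q.1 == p.1)).map (fun q => q.2)).all (fun q => q == p.2) = true
        · rw [if_pos hcond, if_pos hcond]
        · rw [if_neg hcond, if_neg hcond, List.append_nil]
      rw [hstep]
      have hseen : PySem.Set.add (PySem.Set.ofList (l₁.map Prod.fst)) p.1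
          = PySem.Set.ofList ((l₁ ++ [p]).map Prod.fst) := by
        rw [List.map_append, List.map_singleton, PySem.Set.ofList_append_singleton]
      rw [hseen]
      exact ih (l₁ ++ [p]) hp'

-- ===== VERDICT (by name: the statement is the Claim_ definition above) =====
theorem check_mono_origin_labels_spec : Claim_equal_check_mono_origin_labels := by
  intro y_test origin_test gloss_labels _ _
  show check_mono_origin_labels y_test origin_test gloss_labels
      = check_mono_origin_labels_alt y_test origin_test gloss_labels
  have hA : check_mono_origin_labels y_test origin_test gloss_labels
      = (PySem.List.dedup ((y_test.zip origin_test).map Prod.fst)).flatMap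
          (pvG (y_test.zip origin_test) gloss_labels) :=
    pv_outA (y_test.zip origin_test) gloss_labels
  have hB := congrArg Prod.fst
    (pv_foldB (y_test.zip origin_test) gloss_labels (y_test.zip origin_test) [] rfl)
  exact hA.trans hB.symm
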